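-- pv_equiv track=rewrite | github.com/htnghi/snpformer | preprocess/snp_index.py | assign_token_index
-- ===== SOURCE A (Python) =====
-- def assign_token_index(sequences):
--     token_to_index = {}  # Initialize an empty dictionary to store token-to-index mappings
--     index = 0  # Initialize an index counter
--     indexed_kmer_sequences = []  # Initialize an empty list to store indexed k-mer sequences
--     # Iterate over each k-mer sequence
--     for k_mers in sequences:
--         indexed_k_mers = []  # Initialize an empty list to store indexed k-mers for current sequence
--         # Assign index to each token
--         for k_mer in k_mers:
--             if k_mer not in token_to_index:
--                 token_to_index[k_mer] = index
--                 index += 1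
--             indexed_k_mers.append(token_to_index[k_mer])
--         indexed_kmer_sequences.append(indexed_k_mers)
--     return indexed_kmer_sequences, token_to_index
-- ===== SOURCE B (Python) =====
-- def assign_token_index(sequences):
--     # Pass 1: build the vocabulary alone (first-appearance order via setdefault).
--     token_to_index = {}
--     for k_mers in sequences:
--         for k_mer in k_mers:
--             token_to_index.setdefault(k_mer, len(token_to_index))
--     # Pass 2: encode every sequence through the completed vocabulary.
--     indexed_kmer_sequences = [[token_to_index[k_mer] for k_mer in k_mers]
--                               for k_mers in sequences]
--     return indexed_kmer_sequences, token_to_index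
-- ===== Notes on version B (the rewrite author's own statement) =====
-- stated objective: alternative
-- what changed: Replaces A's single interleaved pass (counter variable, per-token branch, nested accumulators) by two separate passes: one setdefault pass that builds the vocabulary alone keyed by len(dict), then a comprehension that encodes all sequences through the completed dict.
import Mathlib
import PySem

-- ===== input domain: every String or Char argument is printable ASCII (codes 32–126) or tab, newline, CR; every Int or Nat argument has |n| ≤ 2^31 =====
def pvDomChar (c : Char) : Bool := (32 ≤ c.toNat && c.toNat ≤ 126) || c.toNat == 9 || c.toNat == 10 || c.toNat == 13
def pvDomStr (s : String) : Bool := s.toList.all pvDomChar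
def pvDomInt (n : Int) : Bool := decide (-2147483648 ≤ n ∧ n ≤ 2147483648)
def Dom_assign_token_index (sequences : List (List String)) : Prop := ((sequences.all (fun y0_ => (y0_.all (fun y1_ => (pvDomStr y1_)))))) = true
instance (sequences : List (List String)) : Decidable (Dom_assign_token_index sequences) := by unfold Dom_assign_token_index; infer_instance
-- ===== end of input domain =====

-- B separates vocabulary construction (one setdefault pass) from encoding (a second map pass);
-- A interleaves both in one pass with an explicit index counter. Return values proved equal.

-- ===== PORT A =====
-- inner loop body: state (token_to_index, index, indexed_k_mers)
def aInner (st : PySem.Dict String Int × Int × List Int) (k_mer : String) :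
    PySem.Dict String Int × Int × List Int :=
  let p := if st.1.contains k_mer then (st.1, st.2.1) else (st.1.insert k_mer st.2.1, st.2.1 + 1)
  (p.1, p.2, st.2.2 ++ [p.1.getD k_mer 0])

-- outer loop body: state (token_to_index, index, indexed_kmer_sequences)
def aOuter (st : PySem.Dict String Int × Int × List (List Int)) (k_mers : List String) :
    PySem.Dict String Int × Int × List (List Int) :=
  let r := k_mers.foldl aInner (st.1, st.2.1, ([] : List Int))
  (r.1, r.2.1, st.2.2 ++ [r.2.2])

def assign_token_index (sequences : List (List String)) : List (List Int) × (List (String × Int)) :=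
  let r := sequences.foldl aOuter ((PySem.Dict.empty : PySem.Dict String Int), (0 : Int), ([] : List (List Int)))
  (r.2.2, r.1.items)

-- ===== PORT B =====
-- token_to_index.setdefault(k_mer, len(token_to_index))
def bStep (d : PySem.Dict String Int) (k_mer : String) : PySem.Dict String Int :=
  d.setdefault k_mer (d.size : Int)

def assign_token_index_alt (sequences : List (List String)) : List (List Int) × (List (String × Int)) :=
  let d := sequences.foldl (fun d k_mers => k_mers.foldl bStep d) (PySem.Dict.empty : PySem.Dict String Int)
  (sequences.map (fun k_mers => k_mers.map (fun k_mer => d.getD k_mer 0)), d.items)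

-- ===== PRECONDITION & SPEC =====
def Spec_assign_token_index (sequences : List (List String)) (out : List (List Int) × (List (String × Int))) : Prop := out = assign_token_index_alt sequences
instance (sequences : List (List String)) (out : List (List Int) × (List (String × Int))) : Decidable (Spec_assign_token_index sequences out) := by unfold Spec_assign_token_index; infer_instance

-- ===== CLAIM (what is proved, stated in full; the proofs are below) =====
def Claim_equal_assign_token_index : Prop := ∀ (sequences : List (List String)), Dom_assign_token_index sequences → Spec_assign_token_index sequences (assign_token_index sequences)

-- ===== LEMMAS AND PROOFS =====

-- d' extends d: every lookup that succeeds in d succeeds with the same value in d'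
def DExt (d d' : PySem.Dict String Int) : Prop :=
  ∀ k v, d.get? k = some v → d'.get? k = some v

theorem dext_refl (d : PySem.Dict String Int) : DExt d d := fun _ _ h => h

theorem dext_bStep (d : PySem.Dict String Int) (k : String) : DExt d (bStep d k) := by
  intro k' v h
  unfold bStep
  by_cases hk : k' = k
  · subst hk
    rw [PySem.Dict.get?_setdefault_self, h]
    simp
  · rw [PySem.Dict.get?_setdefault_of_ne _ _ hk]; exact h

theorem dext_foldl_bStep (ks : List String) (d : PySem.Dict String Int) :
    DExt d (ks.foldl bStep d) := by
  induction ks generalizing d with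
  | nil => exact dext_refl d
  | cons k rest ih =>
    intro k' v h
    exact ih (bStep d k) k' v (dext_bStep d k k' v h)

theorem dext_foldl_seq (seqs : List (List String)) (d : PySem.Dict String Int) :
    DExt d (seqs.foldl (fun d k_mers => k_mers.foldl bStep d) d) := by
  induction seqs generalizing d with
  | nil => exact dext_refl d
  | cons ks rest ih =>
    intro k' v h
    exact ih (ks.foldl bStep d) k' v (dext_foldl_bStep ks d k' v h)

theorem contains_of_dext (d d' : PySem.Dict String Int) (k : String)
    (he : DExt d d') (h : d.contains k = true) : d'.contains k = true := by
  rw [PySem.Dict.contains_eq_isSome_get?] at h ⊢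
  cases hg : d.get? k with
  | none => rw [hg] at h; simp at h
  | some v => rw [he k v hg]; rfl

theorem getD_of_dext (d d' : PySem.Dict String Int) (k : String)
    (he : DExt d d') (h : d.contains k = true) : d.getD k 0 = d'.getD k 0 := by
  rw [PySem.Dict.contains_eq_isSome_get?] at h
  cases hg : d.get? k with
  | none => rw [hg] at h; simp at h
  | some v =>
    rw [PySem.Dict.getD_of_get?_eq_some _ _ hg,
        PySem.Dict.getD_of_get?_eq_some _ _ (he k v hg)]

theorem contains_bStep_self (d : PySem.Dict String Int) (k : String) :
    (bStep d k).contains k = true := by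
  unfold bStep
  rw [PySem.Dict.contains_setdefault]
  simp

theorem contains_foldl_bStep_of_mem (ks : List String) (d : PySem.Dict String Int)
    (k : String) (h : k ∈ ks) : (ks.foldl bStep d).contains k = true := by
  induction ks generalizing d with
  | nil => cases h
  | cons k0 rest ih =>
    rcases List.mem_cons.mp h with h0 | hr
    · subst h0
      exact contains_of_dext _ _ k (dext_foldl_bStep rest (bStep d k)) (contains_bStep_self d k)
    · exact ih (bStep d k0) hr

-- A's inner loop, started at index = d.size, is B's vocabulary fold plus the encoding of ks
theorem innerA_eq (ks : List String) (d : PySem.Dict String Int) (acc : List Int) :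
    ks.foldl aInner (d, (d.size : Int), acc)
      = (ks.foldl bStep d, ((ks.foldl bStep d).size : Int),
          acc ++ ks.map (fun k => (ks.foldl bStep d).getD k 0)) := by
  induction ks generalizing d acc with
  | nil => simp
  | cons k rest ih =>
    have hstep : aInner (d, (d.size : Int), acc) k
        = (bStep d k, ((bStep d k).size : Int), acc ++ [(bStep d k).getD k 0]) := by
      unfold aInner bStep
      by_cases h : d.contains k = true
      · rw [PySem.Dict.setdefault_of_contains _ _ h]
        simp [h]
      · have h' : d.contains k = false := by
          cases hc : d.contains k
          · rfl
          · exact absurd hc h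
        rw [PySem.Dict.setdefault_of_not_contains _ _ h']
        have hsz : (d.insert k (d.size : Int)).size = d.size + 1 := by
          rw [PySem.Dict.size_insert]; simp [h']
        simp [h', hsz]
    have hget : (bStep d k).getD k 0 = (rest.foldl bStep (bStep d k)).getD k 0 :=
      getD_of_dext _ _ k (dext_foldl_bStep rest (bStep d k)) (contains_bStep_self d k)
    calc (k :: rest).foldl aInner (d, (d.size : Int), acc)
        = rest.foldl aInner (bStep d k, ((bStep d k).size : Int), acc ++ [(bStep d k).getD k 0]) := by
          rw [List.foldl_cons, hstep]
      _ = _ := by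
          rw [ih (bStep d k) (acc ++ [(bStep d k).getD k 0])]
          simp [hget]

-- A's outer loop, started at index = d.size, is B's full vocabulary fold plus all encodings
theorem outerA_eq (seqs : List (List String)) (d : PySem.Dict String Int) (acc : List (List Int)) :
    seqs.foldl aOuter (d, (d.size : Int), acc)
      = (seqs.foldl (fun d k_mers => k_mers.foldl bStep d) d,
          ((seqs.foldl (fun d k_mers => k_mers.foldl bStep d) d).size : Int),
          acc ++ seqs.map (fun ks => ks.map (fun k =>
            (seqs.foldl (fun d k_mers => k_mers.foldl bStep d) d).getD k 0))) := by
  induction seqs generalizing d acc with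
  | nil => simp
  | cons ks rest ih =>
    have hstep : aOuter (d, (d.size : Int), acc)  ks
        = (ks.foldl bStep d, ((ks.foldl bStep d).size : Int),
            acc ++ [ks.map (fun k => (ks.foldl bStep d).getD k 0)]) := by
      unfold aOuter
      rw [innerA_eq]
      simp
    have hmap : ks.map (fun k => (ks.foldl bStep d).getD k 0)
        = ks.map (fun k =>
            (rest.foldl (fun d k_mers => k_mers.foldl bStep d) (ks.foldl bStep d)).getD k 0) := by
      apply List.map_congr_left
      intro k hk
      exact getD_of_dext _ _ k (dext_foldl_seq rest (ks.foldl bStep d))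
        (contains_foldl_bStep_of_mem ks d k hk)
    calc (ks :: rest).foldl aOuter (d, (d.size : Int), acc)
        = rest.foldl aOuter (ks.foldl bStep d, ((ks.foldl bStep d).size : Int),
            acc ++ [ks.map (fun k => (ks.foldl bStep d).getD k 0)]) := by
          rw [List.foldl_cons, hstep]
      _ = _ := by
          rw [ih (ks.foldl bStep d) _]
          simp [hmap]

-- ===== VERDICT (by name: the statement is the Claim_ definition above) =====
theorem assign_token_index_spec : Claim_equal_assign_token_index := by
  intro sequences _
  unfold Spec_assign_token_index assign_token_index assign_token_index_alt
  have h0 : (0 : Int) = ((PySem.Dict.empty : PySem.Dict String Int).size : Int) := by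
    simp [PySem.Dict.size_empty]
  rw [h0, outerA_eq]
  simp
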